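-- pv_equiv track=rewrite | github.com/Szymon-Budziak/Algorithms_and_Data_Structures_course_AGH | Graph algorithms/05_lakes.py | lakes
-- ===== SOURCE A (Python) =====
-- def dfs(T, visited, row, col, size):
--     if row < 0 or row >= len(T) or col < 0 or col >= len(T) or T[row][col] == "L" or visited[row][col] == 1:
--         return size
--     else:
--         size += 1
--         visited[row][col] = 1
--     actual_size = size
--     actual_size = dfs(T, visited, row - 1, col, actual_size)
--     actual_size = dfs(T, visited, row, col - 1, actual_size)
--     actual_size = dfs(T, visited, row, col + 1, actual_size)
--     actual_size = dfs(T, visited, row + 1, col, actual_size)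
--     return actual_size
--
-- def lakes(T):
--     visited = [[-1] * len(T) for _ in range(len(T))]
--     count = max_lake = 0
--     for i in range(len(T)):
--         for j in range(len(T)):
--             if T[i][j] == "W" and visited[i][j] == -1:
--                 count += 1
--                 max_lake = max(dfs(T, visited, i, j, 0), max_lake)
--     return count, max_lake
-- ===== SOURCE B (Python) =====
-- def lakes(T):
--     n = len(T)
--     visited = set()
--     count = 0
--     max_lake = 0
--     for i in range(n):
--         for j in range(n):
--             if T[i][j] == "W" and (i, j) not in visited:
--                 count += 1
--                 stack = [(i, j)]
--                 size = 0
--                 while stack: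
--                     r, c = stack.pop()
--                     if r < 0 or r >= n or c < 0 or c >= n or T[r][c] == "L" or (r, c) in visited:
--                         continue
--                     visited.add((r, c))
--                     size += 1
--                     stack.append((r + 1, c))
--                     stack.append((r, c + 1))
--                     stack.append((r, c - 1))
--                     stack.append((r - 1, c))
--                 max_lake = max(size, max_lake)
--     return count, max_lake
-- ===== Notes on version B (the rewrite author's own statement) =====
-- stated objective: idiomatic
-- what changed: Replaces the recursive dfs that threads a size accumulator through a mutated visited matrix by an iterative flood fill: an explicit stack of cells popped in a while loop, with a visited set of (row, col) pairs instead of a -1/1 matrix.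
import Mathlib
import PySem

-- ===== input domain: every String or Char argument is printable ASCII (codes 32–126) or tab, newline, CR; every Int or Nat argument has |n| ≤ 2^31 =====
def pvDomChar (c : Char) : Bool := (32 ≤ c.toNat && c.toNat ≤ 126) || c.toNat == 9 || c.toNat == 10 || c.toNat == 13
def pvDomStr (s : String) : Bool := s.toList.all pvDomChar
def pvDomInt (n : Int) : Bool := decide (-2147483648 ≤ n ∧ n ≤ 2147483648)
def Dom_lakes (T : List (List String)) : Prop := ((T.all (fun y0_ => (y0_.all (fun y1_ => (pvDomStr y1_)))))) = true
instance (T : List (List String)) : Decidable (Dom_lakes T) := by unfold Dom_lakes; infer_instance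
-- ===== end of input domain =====

-- B replaces A's recursive dfs by an iterative flood fill over an explicit stack with a
-- visited set of coordinates (same traversal order, no recursion); return value only.

-- ===== PORT A =====
-- T[r][c], total form: out-of-range reads give "L" (never reached under Pre_lakes, where
-- every accessed index is in range; Python raises IndexError exactly there).
def tget (T : List (List String)) (r c : Int) : String :=
  ((PySem.List.pyGet? T r).bind (fun row => PySem.List.pyGet? row c)).getD "L"

-- visited[r][c], total form with default 1; in `lakes` the matrix is square so the
-- default is never reached at an in-range index.
def vget (v : List (List Int)) (r c : Int) : Int :=
  ((PySem.List.pyGet? v r).bind (fun row => PySem.List.pyGet? row c)).getD 1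

-- visited[r][c] = 1  (guard of dfs ensures 0 ≤ r, c)
def mark (v : List (List Int)) (r c : Int) : List (List Int) :=
  v.modify r.toNat (fun row => row.set c.toNat 1)

-- number of not-yet-visited entries: termination measure for dfs
def unvis (v : List (List Int)) : Nat :=
  (v.map (fun row => row.countP (fun x => x != 1))).sum

lemma countP_set_one_lt (l : List Int) (j : Nat) (x : Int) (hj : l[j]? = some x) (hx : x ≠ 1) :
    (l.set j 1).countP (fun y => y != 1) < l.countP (fun y => y != 1) := by
  induction l generalizing j with
  | nil => simp at hj
  | cons a t ih =>
    cases j with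
    | zero =>
      simp only [List.getElem?_cons_zero, Option.some.injEq] at hj
      subst hj
      simp [hx]
    | succ j =>
      simp only [List.getElem?_cons_succ] at hj
      have := ih j hj
      simp only [List.set_cons_succ, List.countP_cons]
      omega

lemma unvis_modify_lt (v : List (List Int)) (i : Nat) (row : List Int) (hi : v[i]? = some row)
    (j : Nat) (x : Int) (hj : row[j]? = some x) (hx : x ≠ 1) :
    unvis (v.modify i (fun rw => rw.set j 1)) < unvis v := by
  induction v generalizing i with
  | nil => simp at hi
  | cons a t ih =>
    cases i with
    | zero =>
      simp only [List.getElem?_cons_zero, Option.some.injEq] at hi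
      subst hi
      simp only [List.modify_zero_cons, unvis, List.map_cons, List.sum_cons]
      have := countP_set_one_lt a j x hj hx
      omega
    | succ i =>
      simp only [List.getElem?_cons_succ] at hi
      have := ih i hi
      simp only [List.modify_succ_cons, unvis, List.map_cons, List.sum_cons] at *
      omega

lemma vget_cell (v : List (List Int)) (r c : Int) (h : vget v r c ≠ 1) :
    ∃ row x, PySem.List.pyGet? v r = some row ∧ PySem.List.pyGet? row c = some x ∧ x ≠ 1 := by
  unfold vget at h
  cases hrow : PySem.List.pyGet? v r with
  | none => simp [hrow] at h
  | some row =>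
    cases hx : PySem.List.pyGet? row c with
    | none => simp [hrow, hx] at h
    | some x => exact ⟨row, x, rfl, hx, by simpa [hrow, hx] using h⟩

lemma unvis_mark_lt (v : List (List Int)) (r c : Int) (hr : 0 ≤ r) (hc : 0 ≤ c)
    (h : vget v r c ≠ 1) : unvis (mark v r c) < unvis v := by
  obtain ⟨row, x, hrow, hx, hx1⟩ := vget_cell v r c h
  rw [show r = ((r.toNat : Nat) : Int) by omega] at hrow
  rw [show c = ((c.toNat : Nat) : Int) by omega] at hx
  rw [PySem.List.pyGet?_natCast] at hrow hx
  exact unvis_modify_lt v r.toNat row hrow c.toNat x hx hx1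

lemma dfs_dec {T : List (List String)} {visited : List (List Int)} {row col : Int}
    (h : ¬ (row < 0 ∨ (T.length : Int) ≤ row ∨ col < 0 ∨ (T.length : Int) ≤ col ∨
         tget T row col = "L" ∨ vget visited row col = 1)) :
    unvis (mark visited row col) < unvis visited := by
  push_neg at h
  exact unvis_mark_lt visited row col h.1 h.2.2.1 h.2.2.2.2.2

-- dfs(T, visited, row, col, size): returns (size', visited'); the subtype carries the
-- monotonicity fact needed for termination of the sequential recursive calls.
set_option maxHeartbeats 1000000 in
def dfsA (T : List (List String)) (visited : List (List Int)) (row col size : Int) :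
    {p : Int × List (List Int) // unvis p.2 ≤ unvis visited} :=
  if h : row < 0 ∨ (T.length : Int) ≤ row ∨ col < 0 ∨ (T.length : Int) ≤ col ∨
         tget T row col = "L" ∨ vget visited row col = 1 then
    ⟨(size, visited), Nat.le_refl _⟩
  else
    have hmk : unvis (mark visited row col) < unvis visited := dfs_dec h
    let r1 := dfsA T (mark visited row col) (row - 1) col (size + 1)
    let r2 := dfsA T r1.1.2 row (col - 1) r1.1.1
    let r3 := dfsA T r2.1.2 row (col + 1) r2.1.1
    let r4 := dfsA T r3.1.2 (row + 1) col r3.1.1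
    ⟨r4.1, le_trans r4.2 (le_trans r3.2 (le_trans r2.2 (le_trans r1.2 (Nat.le_of_lt hmk))))⟩
termination_by unvis visited
decreasing_by
  · exact hmk
  · exact Nat.lt_of_le_of_lt r1.2 hmk
  · exact Nat.lt_of_le_of_lt (le_trans r2.2 r1.2) hmk
  · exact Nat.lt_of_le_of_lt (le_trans r3.2 (le_trans r2.2 r1.2)) hmk

def lakes (T : List (List String)) : Int × Int :=
  let n : Int := (T.length : Int)
  let visited : List (List Int) := List.replicate T.length (List.replicate T.length (-1 : Int))
  let st :=
    (PySem.List.pyRange 0 n 1).foldl (fun st i =>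
      (PySem.List.pyRange 0 n 1).foldl (fun (st : List (List Int) × Int × Int) j =>
        if tget T i j = "W" ∧ vget st.1 i j = -1 then
          let r := dfsA T st.1 i j 0
          (r.1.2, st.2.1 + 1, max r.1.1 st.2.2)
        else st) st) (visited, (0 : Int), (0 : Int))
  (st.2.1, st.2.2)

-- ===== PORT B =====
def allCells (n : Nat) : List (Int × Int) :=
  (List.range n).flatMap (fun i => (List.range n).map (fun j => (Int.ofNat i, Int.ofNat j)))

-- cells not yet in the visited set: termination measure for the stack loop
def freeCells (n : Nat) (s : PySem.Set (Int × Int)) : Nat :=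
  (allCells n).countP (fun p => !(PySem.Set.contains s p))

lemma mem_allCells {n : Nat} {r c : Int} (hr : 0 ≤ r) (hrn : r < (n : Int))
    (hc : 0 ≤ c) (hcn : c < (n : Int)) : (r, c) ∈ allCells n := by
  unfold allCells
  have h1 : r.toNat < n := by omega
  have h2 : c.toNat < n := by omega
  refine List.mem_flatMap.mpr ⟨r.toNat, List.mem_range.mpr h1,
    List.mem_map.mpr ⟨c.toNat, List.mem_range.mpr h2, ?_⟩⟩
  rw [Prod.mk.injEq]
  exact ⟨by exact_mod_cast Int.toNat_of_nonneg hr, by exact_mod_cast Int.toNat_of_nonneg hc⟩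

lemma countP_lt_strict {α : Type} (p q : α → Bool) (l : List α)
    (hmono : ∀ x ∈ l, q x = true → p x = true) (a : α) (ha : a ∈ l)
    (hpa : p a = true) (hqa : q a = false) : l.countP q < l.countP p := by
  induction l with
  | nil => simp at ha
  | cons b t ih =>
    rcases List.mem_cons.mp ha with hb | ht
    · subst hb
      have : t.countP q ≤ t.countP p :=
        List.countP_mono_left (fun x hx => hmono x (List.mem_cons_of_mem _ hx))
      simp [hpa, hqa]
      omega
    · have := ih (fun x hx => hmono x (List.mem_cons_of_mem _ hx)) ht
      by_cases hq : q b = true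
      · have hp := hmono b (List.mem_cons_self) hq
        simp [hp, hq]; omega
      · simp only [List.countP_cons]
        rw [Bool.not_eq_true] at hq
        simp [hq]; omega

lemma freeCells_add_lt (n : Nat) (s : PySem.Set (Int × Int)) (r c : Int)
    (hr : 0 ≤ r) (hrn : r < (n : Int)) (hc : 0 ≤ c) (hcn : c < (n : Int))
    (hns : ¬ PySem.Set.contains s (r, c) = true) :
    freeCells n (PySem.Set.add s (r, c)) < freeCells n s := by
  apply countP_lt_strict _ _ _ ?mono (r, c) (mem_allCells hr hrn hc hcn) ?pa ?qa
  case mono =>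
    intro x _ hx
    simp only [Bool.not_eq_true'] at hx ⊢
    rw [← Bool.not_eq_true, PySem.Set.contains_iff] at hx ⊢
    exact fun hm => hx ((PySem.Set.mem_add s (r, c) x).mpr (Or.inl hm))
  case pa =>
    simpa using hns
  case qa =>
    have hm : (r, c) ∈ PySem.Set.add s (r, c) := (PySem.Set.mem_add _ _ _).mpr (Or.inr rfl)
    simp [hm]

lemma flood_dec {T : List (List String)} {n : Int} {visited : PySem.Set (Int × Int)}
    {r c : Int}
    (h : ¬ (r < 0 ∨ n ≤ r ∨ c < 0 ∨ n ≤ c ∨ tget T r c = "L" ∨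
         PySem.Set.contains visited (r, c) = true)) :
    freeCells n.toNat (PySem.Set.add visited (r, c)) < freeCells n.toNat visited := by
  push_neg at h
  exact freeCells_add_lt _ _ _ _ (by omega) (by omega) (by omega) (by omega) h.2.2.2.2.2

-- the while-stack loop of B: pop, skip or mark+push the four neighbours
def flood (T : List (List String)) (n : Int) (visited : PySem.Set (Int × Int))
    (stack : List (Int × Int)) (size : Int) : Int × PySem.Set (Int × Int) :=
  match stack with
  | [] => (size, visited)
  | (r, c) :: rest =>
    if h : r < 0 ∨ n ≤ r ∨ c < 0 ∨ n ≤ c ∨ tget T r c = "L" ∨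
           PySem.Set.contains visited (r, c) = true then
      flood T n visited rest size
    else
      flood T n (PySem.Set.add visited (r, c))
        ((r - 1, c) :: (r, c - 1) :: (r, c + 1) :: (r + 1, c) :: rest) (size + 1)
termination_by (freeCells n.toNat visited, stack.length)
decreasing_by
  · apply Prod.Lex.right
    simp
  · apply Prod.Lex.left
    exact flood_dec h

def lakes_alt (T : List (List String)) : Int × Int :=
  let n : Int := (T.length : Int)
  let st :=
    (PySem.List.pyRange 0 n 1).foldl (fun st i =>
      (PySem.List.pyRange 0 n 1).foldl (fun (st : PySem.Set (Int × Int) × Int × Int) j =>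
        if tget T i j = "W" ∧ PySem.Set.contains st.1 (i, j) = false then
          let r := flood T n st.1 [(i, j)] 0
          (r.2, st.2.1 + 1, max r.1 st.2.2)
        else st) st) (([] : PySem.Set (Int × Int)), (0 : Int), (0 : Int))
  (st.2.1, st.2.2)

-- ===== PRECONDITION & SPEC =====
-- Pre_ excludes exactly the grids on which Python A raises IndexError: A reads T[i][j] for
-- all i, j < len(T), so it raises iff some row is shorter than len(T) (B raises there too).
def Pre_lakes (T : List (List String)) : Prop := ∀ row ∈ T, T.length ≤ row.length
instance (T : List (List String)) : Decidable (Pre_lakes T) := by unfold Pre_lakes; infer_instance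

def pvWitness_lakes : List (List String) := [["W", "L"], ["L", "W"]]

def Spec_lakes (T : List (List String)) (out : Int × Int) : Prop := out = lakes_alt T
instance (T : List (List String)) (out : Int × Int) : Decidable (Spec_lakes T out) := by unfold Spec_lakes; infer_instance

-- ===== CLAIM (what is proved, stated in full; the proofs are below) =====
def Claim_equal_lakes : Prop := ∀ (T : List (List String)), Dom_lakes T → Pre_lakes T → Spec_lakes T (lakes T)


-- ===== LEMMAS AND PROOFS =====

-- The coupling invariant between A's visited matrix and B's visited set:
-- square shape, entries in {1, -1}, and "entry = 1" iff the cell is in the set.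
def InvLk (T : List (List String)) (v : List (List Int)) (s : PySem.Set (Int × Int)) : Prop :=
  v.length = T.length ∧
  (∀ (k : Nat) (row : List Int), v[k]? = some row → row.length = T.length) ∧
  ∀ (i j : Nat), i < T.length → j < T.length →
    ((vget v i j = 1 ∨ vget v i j = -1) ∧
     (vget v i j = 1 ↔ ((i : Int), (j : Int)) ∈ s))

lemma vget_natCast (v : List (List Int)) (i j : Nat) :
    vget v (i : Int) (j : Int) = ((v[i]?.bind fun row => row[j]?).getD 1) := by
  simp [vget, PySem.List.pyGet?_natCast]

lemma mark_natCast (v : List (List Int)) (a b : Nat) :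
    mark v (a : Int) (b : Int) = v.modify a (fun row => row.set b 1) := by
  simp [mark]

lemma vget_mark_eq (v : List (List Int)) (a b i j : Nat)
    (hlen : ∀ row, v[a]? = some row → b < row.length) :
    vget (mark v (a : Int) (b : Int)) (i : Int) (j : Int)
      = if i = a ∧ j = b then 1 else vget v (i : Int) (j : Int) := by
  rw [vget_natCast, vget_natCast, mark_natCast, List.getElem?_modify]
  by_cases hi : a = i
  · subst hi
    cases hv : v[a]? with
    | none => simp
    | some row =>
      have hb := hlen row hv
      by_cases hj : j = b
      · subst hj
        simp [hb]
      · have hbj : ¬ b = j := fun h => hj h.symm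
        simp [hbj]
        exact fun h => absurd h hj
  · have : ¬ (i = a ∧ j = b) := fun h => hi h.1.symm
    simp [hi, this]

lemma pair_cast_eq (i j a b : Nat) :
    (((i : Int), (j : Int)) = ((a : Int), (b : Int))) ↔ (i = a ∧ j = b) := by
  rw [Prod.mk.injEq]
  omega

lemma inv_mark_add (T : List (List String)) {v : List (List Int)}
    {s : PySem.Set (Int × Int)} (hInv : InvLk T v s) {r c : Int}
    (hr : 0 ≤ r) (hrn : r < (T.length : Int)) (hc : 0 ≤ c) (hcn : c < (T.length : Int)) :
    InvLk T (mark v r c) (PySem.Set.add s (r, c)) := by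
  obtain ⟨hlen, hrows, hcell⟩ := hInv
  have hra : r = ((r.toNat : Nat) : Int) := by omega
  have hca : c = ((c.toNat : Nat) : Int) := by omega
  rw [hra, hca]
  have hlenrow : ∀ row, v[r.toNat]? = some row → c.toNat < row.length := by
    intro row h
    rw [hrows r.toNat row h]
    omega
  refine ⟨?_, ?_, ?_⟩
  · rw [mark_natCast]
    simpa using hlen
  · intro k row h
    rw [mark_natCast, List.getElem?_modify] at h
    cases hv : v[k]? with
    | none => rw [hv] at h; exact absurd h (by simp)
    | some row0 =>
      rw [hv] at h
      simp only [Option.map_eq_map, Option.map_some, Option.some.injEq] at h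
      by_cases hk : r.toNat = k
      · rw [if_pos hk] at h
        rw [← h]
        simpa using hrows k row0 hv
      · rw [if_neg hk] at h
        rw [← h]
        exact hrows k row0 hv
  · intro i j hi hj
    rw [vget_mark_eq v r.toNat c.toNat i j hlenrow]
    by_cases hij : i = r.toNat ∧ j = c.toNat
    · rw [if_pos hij]
      refine ⟨Or.inl rfl, ?_, fun _ => rfl⟩
      intro _
      rw [PySem.Set.mem_add]
      right
      rw [pair_cast_eq]
      exact hij
    · rw [if_neg hij]
      obtain ⟨h1, h2⟩ := hcell i j hi hj
      refine ⟨h1, ?_⟩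
      rw [h2, PySem.Set.mem_add]
      constructor
      · exact Or.inl
      · rintro (h | h)
        · exact h
        · exact absurd ((pair_cast_eq i j r.toNat c.toNat).mp h) hij

-- A's dfs guard and B's skip guard agree under the invariant.
lemma guard_iff (T : List (List String)) (v : List (List Int))
    (s : PySem.Set (Int × Int)) (hInv : InvLk T v s) (r c : Int) :
    (r < 0 ∨ (T.length : Int) ≤ r ∨ c < 0 ∨ (T.length : Int) ≤ c ∨
       tget T r c = "L" ∨ vget v r c = 1) ↔
    (r < 0 ∨ (T.length : Int) ≤ r ∨ c < 0 ∨ (T.length : Int) ≤ c ∨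
       tget T r c = "L" ∨ PySem.Set.contains s (r, c) = true) := by
  by_cases h5 : r < 0 ∨ (T.length : Int) ≤ r ∨ c < 0 ∨ (T.length : Int) ≤ c ∨ tget T r c = "L"
  · constructor <;> intro _ <;> tauto
  · push_neg at h5
    obtain ⟨hr, hrn, hc, hcn, hL⟩ := h5
    have hcast : r = ((r.toNat : Nat) : Int) ∧ c = ((c.toNat : Nat) : Int) := by omega
    obtain ⟨h1, h2⟩ := (hInv.2.2 r.toNat c.toNat (by omega) (by omega))
    rw [← hcast.1, ← hcast.2] at h2
    rw [PySem.Set.contains_iff]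
    tauto

-- equation lemmas for flood
lemma flood_nil (T : List (List String)) (n : Int) (s : PySem.Set (Int × Int)) (size : Int) :
    flood T n s [] size = (size, s) := by
  conv_lhs => rw [flood.eq_def]

lemma flood_skip {T : List (List String)} {n : Int} {s : PySem.Set (Int × Int)}
    {r c size : Int} {rest : List (Int × Int)}
    (h : r < 0 ∨ n ≤ r ∨ c < 0 ∨ n ≤ c ∨ tget T r c = "L" ∨
         PySem.Set.contains s (r, c) = true) :
    flood T n s ((r, c) :: rest) size = flood T n s rest size := by
  conv_lhs => rw [flood.eq_def]
  exact dif_pos h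

lemma flood_go {T : List (List String)} {n : Int} {s : PySem.Set (Int × Int)}
    {r c size : Int} {rest : List (Int × Int)}
    (h : ¬ (r < 0 ∨ n ≤ r ∨ c < 0 ∨ n ≤ c ∨ tget T r c = "L" ∨
         PySem.Set.contains s (r, c) = true)) :
    flood T n s ((r, c) :: rest) size
      = flood T n (PySem.Set.add s (r, c))
          ((r - 1, c) :: (r, c - 1) :: (r, c + 1) :: (r + 1, c) :: rest) (size + 1) := by
  conv_lhs => rw [flood.eq_def]
  exact dif_neg h

-- equation lemmas for dfsA
lemma dfsA_pos {T : List (List String)} {v : List (List Int)} {r c size : Int}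
    (h : r < 0 ∨ (T.length : Int) ≤ r ∨ c < 0 ∨ (T.length : Int) ≤ c ∨
         tget T r c = "L" ∨ vget v r c = 1) :
    (dfsA T v r c size).1 = (size, v) := by
  conv_lhs => rw [dfsA.eq_def]
  rw [dif_pos h]

lemma dfsA_neg {T : List (List String)} {v : List (List Int)} {r c size : Int}
    (h : ¬ (r < 0 ∨ (T.length : Int) ≤ r ∨ c < 0 ∨ (T.length : Int) ≤ c ∨
         tget T r c = "L" ∨ vget v r c = 1)) :
    (dfsA T v r c size).1 =
      (let r1 := dfsA T (mark v r c) (r - 1) c (size + 1)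
       let r2 := dfsA T r1.1.2 r (c - 1) r1.1.1
       let r3 := dfsA T r2.1.2 r (c + 1) r2.1.1
       let r4 := dfsA T r3.1.2 (r + 1) c r3.1.1
       r4.1) := by
  conv_lhs => rw [dfsA.eq_def]
  rw [dif_neg h]

-- proof-only device: A's dfs run over a worklist of seeds (sequentially)
def runA (T : List (List String)) (v : List (List Int))
    (stack : List (Int × Int)) (size : Int) : Int × List (List Int) :=
  match stack with
  | [] => (size, v)
  | (r, c) :: rest => runA T (dfsA T v r c size).1.2 rest (dfsA T v r c size).1.1

lemma runA_skip {T : List (List String)} {v : List (List Int)} {r c size : Int}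
    {rest : List (Int × Int)}
    (h : r < 0 ∨ (T.length : Int) ≤ r ∨ c < 0 ∨ (T.length : Int) ≤ c ∨
         tget T r c = "L" ∨ vget v r c = 1) :
    runA T v ((r, c) :: rest) size = runA T v rest size := by
  show runA T (dfsA T v r c size).1.2 rest (dfsA T v r c size).1.1 = _
  rw [dfsA_pos h]

lemma runA_step {T : List (List String)} {v : List (List Int)} {r c size : Int}
    {rest : List (Int × Int)}
    (h : ¬ (r < 0 ∨ (T.length : Int) ≤ r ∨ c < 0 ∨ (T.length : Int) ≤ c ∨
         tget T r c = "L" ∨ vget v r c = 1)) :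
    runA T v ((r, c) :: rest) size
      = runA T (mark v r c)
          ((r - 1, c) :: (r, c - 1) :: (r, c + 1) :: (r + 1, c) :: rest) (size + 1) := by
  show runA T (dfsA T v r c size).1.2 rest (dfsA T v r c size).1.1 = _
  rw [dfsA_neg h]
  rfl

-- Main simulation: B's stack loop computes exactly what running A's dfs on each
-- stack entry in order computes, keeping the visited structures coupled.
lemma sim (T : List (List String)) :
    ∀ (N : Nat) (v : List (List Int)) (s : PySem.Set (Int × Int))
      (stack : List (Int × Int)) (size : Int),
      unvis v ≤ N → InvLk T v s →
      ∃ s', InvLk T (runA T v stack size).2 s' ∧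
        flood T (T.length : Int) s stack size = ((runA T v stack size).1, s') := by
  intro N
  induction N with
  | zero =>
    intro v s stack size hN hInv
    induction stack generalizing size with
    | nil => exact ⟨s, hInv, by rw [flood_nil]; rfl⟩
    | cons p rest ihs =>
      obtain ⟨r, c⟩ := p
      by_cases hg : r < 0 ∨ (T.length : Int) ≤ r ∨ c < 0 ∨ (T.length : Int) ≤ c ∨
          tget T r c = "L" ∨ vget v r c = 1
      · rw [runA_skip hg, flood_skip ((guard_iff T v s hInv r c).mp hg)]
        exact ihs size
      · exfalso
        push_neg at hg
        have := unvis_mark_lt v r c hg.1 hg.2.2.1 hg.2.2.2.2.2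
        omega
  | succ N ihN =>
    intro v s stack size hN hInv
    induction stack generalizing size with
    | nil => exact ⟨s, hInv, by rw [flood_nil]; rfl⟩
    | cons p rest ihs =>
      obtain ⟨r, c⟩ := p
      by_cases hg : r < 0 ∨ (T.length : Int) ≤ r ∨ c < 0 ∨ (T.length : Int) ≤ c ∨
          tget T r c = "L" ∨ vget v r c = 1
      · rw [runA_skip hg, flood_skip ((guard_iff T v s hInv r c).mp hg)]
        exact ihs size
      · have hg' := hg
        push_neg at hg'
        have hmk := unvis_mark_lt v r c hg'.1 hg'.2.2.1 hg'.2.2.2.2.2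
        have hInv1 := inv_mark_add T hInv hg'.1 hg'.2.1 hg'.2.2.1 hg'.2.2.2.1
        have hgB : ¬ (r < 0 ∨ (T.length : Int) ≤ r ∨ c < 0 ∨ (T.length : Int) ≤ c ∨
            tget T r c = "L" ∨ PySem.Set.contains s (r, c) = true) :=
          fun h => hg ((guard_iff T v s hInv r c).mpr h)
        rw [runA_step hg, flood_go hgB]
        exact ihN (mark v r c) (PySem.Set.add s (r, c))
          ((r - 1, c) :: (r, c - 1) :: (r, c + 1) :: (r + 1, c) :: rest) (size + 1)
          (by omega) hInv1

-- relational fold lemma for the outer loops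
lemma foldl_rel {sigma tau alpha : Type} (R : sigma → tau → Prop)
    (f : sigma → alpha → sigma) (g : tau → alpha → tau) :
    ∀ (l : List alpha) (s : sigma) (t : tau), R s t →
      (∀ s t x, x ∈ l → R s t → R (f s x) (g t x)) →
      R (l.foldl f s) (l.foldl g t) := by
  intro l
  induction l with
  | nil => intro s t h _; exact h
  | cons a l ih =>
    intro s t h hstep
    exact ih (f s a) (g t a) (hstep s t a (List.mem_cons_self) h)
      (fun s t x hx => hstep s t x (List.mem_cons_of_mem _ hx))

lemma inv_init (T : List (List String)) :
    InvLk T (List.replicate T.length (List.replicate T.length (-1 : Int))) [] := by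
  refine ⟨by simp, ?_, ?_⟩
  · intro k row h
    rw [List.getElem?_replicate] at h
    by_cases hk : k < T.length
    · rw [if_pos hk] at h
      simp at h
      rw [← h]
      simp
    · rw [if_neg hk] at h
      simp at h
  · intro i j hi hj
    rw [vget_natCast]
    simp [hi, hj]

lemma pair_snd_eq {gam del : Type} {a : gam × Int × Int} {b : del × Int × Int}
    (h : a.2 = b.2) : ((a.2.1, a.2.2) : Int × Int) = (b.2.1, b.2.2) := by
  rw [h]

lemma lakes_eq_alt (T : List (List String)) : lakes T = lakes_alt T := by
  unfold lakes lakes_alt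
  refine pair_snd_eq (And.right (foldl_rel
    (fun (st : List (List Int) × Int × Int)
         (st' : PySem.Set (Int × Int) × Int × Int) =>
      InvLk T st.1 st'.1 ∧ st.2 = st'.2) _ _ _ _ _ ⟨inv_init T, rfl⟩ ?_))
  intro st0 st0' i hi hR0
  refine foldl_rel
    (fun (st : List (List Int) × Int × Int)
         (st' : PySem.Set (Int × Int) × Int × Int) =>
      InvLk T st.1 st'.1 ∧ st.2 = st'.2) _ _ _ _ _ hR0 ?_
  intro st st' j hj hR
  obtain ⟨hInv, h2⟩ := hR
  rw [PySem.List.mem_pyRange_one] at hi hj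
  have hcond : (tget T i j = "W" ∧ vget st.1 i j = -1) ↔
      (tget T i j = "W" ∧ PySem.Set.contains st'.1 (i, j) = false) := by
    have hic : i = ((i.toNat : Nat) : Int) := by omega
    have hjc : j = ((j.toNat : Nat) : Int) := by omega
    obtain ⟨ha, hb⟩ := hInv.2.2 i.toNat j.toNat (by omega) (by omega)
    rw [← hic, ← hjc] at ha hb
    rw [← Bool.not_eq_true, PySem.Set.contains_iff, ← hb]
    constructor
    · rintro ⟨hW, hv⟩
      refine ⟨hW, ?_⟩
      rw [hv]
      decide
    · rintro ⟨hW, hv⟩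
      rcases ha with h | h
      · exact absurd h hv
      · exact ⟨hW, h⟩
  by_cases hA : tget T i j = "W" ∧ vget st.1 i j = -1
  · rw [if_pos hA, if_pos (hcond.mp hA)]
    obtain ⟨s', hI', he⟩ := sim T (unvis st.1) st.1 st'.1 [(i, j)] 0 le_rfl hInv
    have hrun : runA T st.1 [(i, j)] 0
        = ((dfsA T st.1 i j 0).1.1, (dfsA T st.1 i j 0).1.2) := rfl
    rw [hrun] at hI' he
    rw [he, h2]
    exact ⟨hI', rfl⟩
  · rw [if_neg hA, if_neg (fun h => hA (hcond.mpr h))]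
    exact ⟨hInv, h2⟩

-- ===== VERDICT (by name: the statement is the Claim_ definition above) =====
theorem lakes_spec : Claim_equal_lakes := by
  intro T _ _
  show lakes T = lakes_alt T
  exact lakes_eq_alt T
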